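-- pv_equiv track=rewrite | github.com/LudvigsenAnders/uge4 | helper_functions/txt_reader.py | get_name_length_frequencies
-- ===== SOURCE A (Python) =====
-- def get_name_length_frequencies(names: list[str]) -> dict[int, int]:
--     '''Calculate the frequency of each name length in the list.
--     Takes a list of names. Finds the length of each name and counts
--     number of names of that length.
--     Args:
--         names (list of str): A list of names.
--         Returns: A dictionary where the keys are name lengths and the values
--         are the frequencies of those lengths.
--     '''
--     name_length_freguency = {}
--     for name in names:
--         length = len(name)
--         if length not in name_length_freguency:
--             name_length_freguency[length] = 1
--         else:
--             name_length_freguency[length] += 1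
--     return name_length_freguency
-- ===== SOURCE B (Python) =====
-- def get_name_length_frequencies(names: list[str]) -> dict[int, int]:
--     '''Calculate the frequency of each name length in the list.'''
--     lengths = [len(name) for name in names]
--     return {length: lengths.count(length) for length in dict.fromkeys(lengths)}
-- ===== Notes on version B (the rewrite author's own statement) =====
-- stated objective: alternative
-- what changed: B precomputes the list of lengths, dedups it in first-occurrence order (dict.fromkeys) and builds the dict in one comprehension with lengths.count per distinct length, instead of A's running hash-table accumulator updated element by element.
import Mathlib
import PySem

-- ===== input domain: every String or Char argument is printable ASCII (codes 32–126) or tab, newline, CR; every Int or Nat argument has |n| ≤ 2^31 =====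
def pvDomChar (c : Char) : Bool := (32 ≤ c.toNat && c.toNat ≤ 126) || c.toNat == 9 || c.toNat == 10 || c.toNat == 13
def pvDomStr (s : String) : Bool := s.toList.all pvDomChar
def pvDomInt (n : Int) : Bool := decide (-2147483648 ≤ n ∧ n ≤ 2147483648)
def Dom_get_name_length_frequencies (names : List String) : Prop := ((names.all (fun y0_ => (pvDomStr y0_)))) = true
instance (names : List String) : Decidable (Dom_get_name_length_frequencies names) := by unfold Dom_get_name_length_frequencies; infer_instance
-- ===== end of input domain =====

-- B replaces A's running dict accumulator by a dedup-then-count comprehension (objective: alternative decomposition, same result).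

-- ===== PORT A =====
def get_name_length_frequencies (names : List String) : List (Int × Int) :=
  (names.foldl (fun d name =>
      let length : Int := PySem.Str.len name
      if d.contains length = false then d.insert length 1
      else d.insert length (d.getD length 0 + 1))
    (PySem.Dict.empty : PySem.Dict Int Int)).items

-- ===== PORT B =====
def get_name_length_frequencies_alt (names : List String) : List (Int × Int) :=
  let lengths : List Int := names.map (fun name => (PySem.Str.len name : Int))
  (PySem.List.dedup lengths).map (fun length => (length, (PySem.List.count lengths length : Int)))

-- ===== PRECONDITION & SPEC =====
def Spec_get_name_length_frequencies (names : List String) (out : List (Int × Int)) : Prop := out = get_name_length_frequencies_alt names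
instance (names : List String) (out : List (Int × Int)) : Decidable (Spec_get_name_length_frequencies names out) := by unfold Spec_get_name_length_frequencies; infer_instance

-- ===== CLAIM (what is proved, stated in full; the proofs are below) =====
def Claim_equal_get_name_length_frequencies : Prop := ∀ (names : List String), Dom_get_name_length_frequencies names → Spec_get_name_length_frequencies names (get_name_length_frequencies names)

-- ===== LEMMAS AND PROOFS =====

-- A's branching update is exactly Counter's step d.modify x 0 (· + 1).
theorem pv_step_eq (d : PySem.Dict Int Int) (x : Int) :
    (if d.contains x = false then d.insert x 1 else d.insert x (d.getD x 0 + 1)) = d.modify x 0 (· + 1) := by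
  simp only [PySem.Dict.contains, PySem.Dict.insert, PySem.Dict.modify, PySem.Dict.getD, PySem.Dict.get?]
  by_cases h : (d.items.any fun p => p.1 == x) = true
  · simp [h]
  · have hf : d.items.find? (fun p => p.1 == x) = none := by
      rw [List.find?_eq_none]; intro p hp
      exact fun hc => h (List.any_eq_true.mpr ⟨p, hp, hc⟩)
    simp [h, hf]

-- ===== VERDICT (by name: the statement is the Claim_ definition above) =====
theorem get_name_length_frequencies_spec : Claim_equal_get_name_length_frequencies := by
  intro names _
  unfold Spec_get_name_length_frequencies get_name_length_frequencies get_name_length_frequencies_alt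
  simp only [pv_step_eq]
  rw [← List.foldl_map (f := fun name => PySem.Str.len name) (g := fun d x => PySem.Dict.modify d x 0 (fun v => v + 1)) (l := names) (init := PySem.Dict.empty)]
  rw [← PySem.Dict.counter_eq_foldl, PySem.Dict.items_counter]
  simp [PySem.List.dedup_eq_ofList, PySem.List.count_eq]
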